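-- pv_equiv track=rewrite | github.com/artkpv/code-dojo | hackerrank.com/contests/hourrank-29/a.py | solve
-- ===== SOURCE A (Python) =====
-- def solve(board):
--     color = board[0][0]
--     n = len(board)
--     for i in range(n):
--         for j in range(n):
--             if board[i][j] != color:
--                 return False
--             color = 1 if color == 0 else 0
--         if n % 2 == 0:
--             color = 1 if color == 0 else 0
--     return True
-- ===== SOURCE B (Python) =====
-- def solve(board):
--     n = len(board)
--     a = 1 if board[0][0] == 0 else 0
--     row_even = [1 - a if j % 2 == 0 else a for j in range(n)]
--     row_odd = [a if j % 2 == 0 else 1 - a for j in range(n)]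
--     if board[0][1:n] != row_even[1:]:
--         return False
--     for i in range(1, n):
--         if board[i][:n] != (row_even if i % 2 == 0 else row_odd):
--             return False
--     return True
-- ===== Notes on version B (the rewrite author's own statement) =====
-- stated objective: alternative
-- what changed: B replaces A's per-cell scan with a running toggled color by a staged design: it precomputes the two expected template rows (even/odd) once from board[0][0], then checks the board row-by-row with whole-row list comparisons against the alternating templates (row 0 compared from index 1 to skip the trivially-true (0,0) cell).
import Mathlib
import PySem

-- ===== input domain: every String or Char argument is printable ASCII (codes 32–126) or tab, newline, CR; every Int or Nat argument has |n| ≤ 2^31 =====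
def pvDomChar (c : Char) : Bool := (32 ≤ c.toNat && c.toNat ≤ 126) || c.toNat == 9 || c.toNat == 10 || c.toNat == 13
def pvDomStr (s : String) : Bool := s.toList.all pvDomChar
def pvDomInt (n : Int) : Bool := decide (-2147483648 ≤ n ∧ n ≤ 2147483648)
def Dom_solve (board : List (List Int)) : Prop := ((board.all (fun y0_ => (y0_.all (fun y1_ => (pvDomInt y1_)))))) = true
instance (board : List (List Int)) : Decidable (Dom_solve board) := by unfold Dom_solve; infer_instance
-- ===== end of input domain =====

-- B precomputes the two expected template rows once and checks the board by whole-row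
-- list comparisons against them (objective: alternative, same asymptotic cost).

-- board[i][j]; exact under Pre_solve (both indices in range there); default 0 only totalizes it.
def pyCell (board : List (List Int)) (i j : Int) : Int :=
  (PySem.List.pyGet? ((PySem.List.pyGet? board i).getD []) j).getD 0

-- ===== PORT A =====
-- inner 'for j in range(n)' loop: returns none on 'return False', else the final color
def solveInnerA (board : List (List Int)) (i : Int) : Int → List Int → Option Int
  | color, [] => some color
  | color, j :: js =>
    if pyCell board i j ≠ color then none
    else solveInnerA board i (if color = 0 then 1 else 0) js

-- outer 'for i in range(n)' loop, with the per-row extra flip when n is even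
def solveOuterA (board : List (List Int)) (n : Int) : Int → List Int → Bool
  | _, [] => true
  | color, i :: is =>
    match solveInnerA board i color (PySem.List.pyRange 0 n 1) with
    | none => false
    | some c =>
      solveOuterA board n (if PySem.Int.mod n 2 = 0 then (if c = 0 then 1 else 0) else c) is

def solve (board : List (List Int)) : Bool :=
  let color := pyCell board 0 0
  let n : Int := board.length
  solveOuterA board n color (PySem.List.pyRange 0 n 1)

-- ===== PORT B =====
-- board[i] (exact under Pre_solve, where the row index is in range)
def bRow (board : List (List Int)) (i : Int) : List Int :=
  (PySem.List.pyGet? board i).getD []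

-- row_even = [1 - a if j % 2 == 0 else a for j in range(n)]
def rowEven (a n : Int) : List Int :=
  (PySem.List.pyRange 0 n 1).map (fun j => if PySem.Int.mod j 2 = 0 then 1 - a else a)

-- row_odd = [a if j % 2 == 0 else 1 - a for j in range(n)]
def rowOdd (a n : Int) : List Int :=
  (PySem.List.pyRange 0 n 1).map (fun j => if PySem.Int.mod j 2 = 0 then a else 1 - a)

-- for i in range(1, n): if board[i][:n] != (row_even if i % 2 == 0 else row_odd): return False
def rowsLoop (board : List (List Int)) (a n : Int) : List Int → Bool
  | [] => true
  | i :: is =>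
    if PySem.List.slice (bRow board i) none (some n)
        ≠ (if PySem.Int.mod i 2 = 0 then rowEven a n else rowOdd a n) then false
    else rowsLoop board a n is

def solve_alt (board : List (List Int)) : Bool :=
  let n : Int := board.length
  let a : Int := if (PySem.List.pyGet? (bRow board 0) 0).getD 0 = 0 then 1 else 0
  if PySem.List.slice (bRow board 0) (some 1) (some n)
      ≠ PySem.List.slice (rowEven a n) (some 1) none then false
  else rowsLoop board a n (PySem.List.pyRange 1 n 1)

-- ===== PRECONDITION & SPEC =====
-- expected checkerboard value at cell (i,j), from board[0][0] (Pre_-local; reader-checkable arithmetic)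
def preExp (c0 : Int) (i j : Nat) : Int :=
  if (i + j) % 2 = 1 then (if c0 = 0 then 1 else 0) else 1 - (if c0 = 0 then 1 else 0)

-- first position (in row-major order) at which A's traversal would step past the end of a short row
def preOverflowKey (board : List (List Int)) : Nat :=
  (board.findIdx (fun row => decide (row.length < board.length))) * board.length
    + (board.getD (board.findIdx (fun row => decide (row.length < board.length))) []).length

-- Pre_ is exactly where A returns normally: the board is nonempty and either every row has at
-- least len(board) cells, or (board is ragged) some cell breaking the checkerboard pattern sits
-- strictly before the first out-of-range position, so A returns False before its IndexError.
def Pre_solve (board : List (List Int)) : Prop :=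
  board ≠ [] ∧
  ((∀ row ∈ board, board.length ≤ row.length) ∨
    ∃ i < board.length, ∃ j < board.length,
      ¬(i = 0 ∧ j = 0) ∧ j < (board.getD i []).length ∧
      i * board.length + j < preOverflowKey board ∧
      (board.getD i []).getD j 0 ≠ preExp ((board.getD 0 []).getD 0 0) i j)
instance (board : List (List Int)) : Decidable (Pre_solve board) := by unfold Pre_solve; infer_instance
def pvWitness_solve : List (List Int) := [[0, 1], [1, 0]]

def Spec_solve (board : List (List Int)) (out : Bool) : Prop := out = solve_alt board
instance (board : List (List Int)) (out : Bool) : Decidable (Spec_solve board out) := by unfold Spec_solve; infer_instance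

-- ===== CLAIM (what is proved, stated in full; the proofs are below) =====
def Claim_equal_solve : Prop := ∀ (board : List (List Int)), Dom_solve board → Pre_solve board → Spec_solve board (solve board)

-- ===== LEMMAS AND PROOFS =====

-- a = 1 if board[0][0] == 0 else 0, shared by the proof's characterisations
def aOf (board : List (List Int)) : Int := if pyCell board 0 0 = 0 then 1 else 0

-- expected value at (i,j) as a direct formula
def expVal (a i j : Int) : Int := if PySem.Int.mod (i + j) 2 = 1 then a else 1 - a

-- intermediate cell-wise check (proof device linking the two ports)
def cellInner (board : List (List Int)) (a i : Int) : List Int → Bool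
  | [] => true
  | j :: js =>
    if i = 0 ∧ j = 0 then cellInner board a i js
    else if pyCell board i j ≠ expVal a i j then false
    else cellInner board a i js

def cellOuter (board : List (List Int)) (a n : Int) : List Int → Bool
  | [] => true
  | i :: is =>
    if cellInner board a i (PySem.List.pyRange 0 n 1) then cellOuter board a n is else false

def cellCheck (board : List (List Int)) : Bool :=
  cellOuter board (aOf board) (board.length : Int) (PySem.List.pyRange 0 (board.length : Int) 1)

-- "every cell other than (0,0) carries its expected value" (cells read with default 0)
def CellsOK (board : List (List Int)) : Prop :=
  ∀ i j : Int, 0 ≤ i → i < (board.length : Int) → 0 ≤ j → j < (board.length : Int) →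
    ¬(i = 0 ∧ j = 0) → pyCell board i j = expVal (aOf board) i j

-- ---- part 1: solve = cellCheck (A's running color is the positional formula) ----

theorem toggle_expVal (a i j : Int) (ha : a = 0 ∨ a = 1) :
    (if expVal a i j = 0 then (1:Int) else 0) = expVal a i (j + 1) := by
  unfold expVal
  simp only [PySem.Int.mod_eq_emod_of_pos (show (0:Int) < 2 by omega)]
  rcases ha with rfl | rfl <;> split_ifs <;> first | rfl | omega

theorem step_expVal (a i n : Int) (ha : a = 0 ∨ a = 1) :
    (if PySem.Int.mod n 2 = 0 then (if expVal a i n = 0 then (1:Int) else 0) else expVal a i n)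
      = expVal a (i + 1) 0 := by
  unfold expVal
  simp only [PySem.Int.mod_eq_emod_of_pos (show (0:Int) < 2 by omega)]
  rcases ha with rfl | rfl <;> split_ifs <;> first | rfl | omega

theorem seg_cons (j0 : Int) (k : Nat) :
    PySem.List.pyRange j0 (j0 + (k + 1)) 1 = j0 :: PySem.List.pyRange (j0 + 1) (j0 + 1 + k) 1 := by
  have h : j0 + ((k : Int) + 1) = j0 + 1 + (k : Int) := by ring
  rw [h, PySem.List.pyRange_one_cons (by omega)]

theorem inner_agree (board : List (List Int)) (a : Int) (ha : a = 0 ∨ a = 1) :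
    ∀ (k : Nat) (i j0 : Int), (i ≠ 0 ∨ 1 ≤ j0) →
    (solveInnerA board i (expVal a i j0) (PySem.List.pyRange j0 (j0 + k) 1)
        = some (expVal a i (j0 + k))
      ∧ cellInner board a i (PySem.List.pyRange j0 (j0 + k) 1) = true)
    ∨ (solveInnerA board i (expVal a i j0) (PySem.List.pyRange j0 (j0 + k) 1) = none
      ∧ cellInner board a i (PySem.List.pyRange j0 (j0 + k) 1) = false) := by
  intro k
  induction k with
  | zero =>
    intro i j0 h
    left
    refine ⟨?_, ?_⟩ <;> simp [PySem.List.pyRange_one_eq_nil (le_refl j0), solveInnerA, cellInner]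
  | succ k ih =>
    intro i j0 h
    have hskip : ¬ (i = 0 ∧ j0 = 0) := by
      rcases h with h | h
      · exact fun hp => h hp.1
      · exact fun hp => by omega
    push_cast
    rw [seg_cons]
    by_cases hc : pyCell board i j0 = expVal a i j0
    · have h' : i ≠ 0 ∨ 1 ≤ j0 + 1 := by
        rcases h with h | h
        · exact Or.inl h
        · exact Or.inr (by omega)
      have hrec := ih i (j0 + 1) h'
      have harith : j0 + 1 + (k : Int) = j0 + ((k : Int) + 1) := by ring
      simp only [solveInnerA, cellInner, hc, hskip, if_false, ite_not,
        toggle_expVal a i j0 ha]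
      simpa [harith] using hrec
    · right
      constructor
      · simp [solveInnerA, hc]
      · simp [cellInner, hskip, hc]

theorem outer_agree (board : List (List Int)) (a : Int) (ha : a = 0 ∨ a = 1) (n : Int)
    (hn : n = (board.length : Int)) :
    ∀ (m : Nat) (i0 : Int), 1 ≤ i0 →
    solveOuterA board n (expVal a i0 0) (PySem.List.pyRange i0 (i0 + m) 1)
      = cellOuter board a n (PySem.List.pyRange i0 (i0 + m) 1) := by
  intro m
  induction m with
  | zero =>
    intro i0 _
    simp [PySem.List.pyRange_one_eq_nil (le_refl i0), solveOuterA, cellOuter]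
  | succ m ih =>
    intro i0 h1
    push_cast
    rw [seg_cons]
    have hrow := inner_agree board a ha board.length i0 0 (Or.inl (by omega))
    rw [show (0 : Int) + (board.length : Int) = n from by omega] at hrow
    rcases hrow with ⟨hA, hB⟩ | ⟨hA, hB⟩
    · have harith : i0 + 1 + (m : Int) = i0 + ((m : Int) + 1) := by ring
      have hrec := ih (i0 + 1) (by omega)
      simp only [solveOuterA, cellOuter, hA, hB, if_true, step_expVal a i0 n ha]
      simpa [harith] using hrec
    · simp [solveOuterA, cellOuter, hA, hB]

theorem solve_eq_cellCheck (board : List (List Int)) (hlen : 1 ≤ board.length) :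
    solve board = cellCheck board := by
  unfold solve cellCheck
  set c0 := pyCell board 0 0 with hc0
  set a : Int := aOf board with hadef
  have hadef' : a = if c0 = 0 then 1 else 0 := by rw [hadef]; rfl
  set n : Int := (board.length : Int) with hn
  have ha : a = 0 ∨ a = 1 := by rw [hadef']; split_ifs <;> simp
  have hsplit : PySem.List.pyRange 0 n 1 = 0 :: PySem.List.pyRange 1 n 1 :=
    PySem.List.pyRange_one_cons (by omega)
  have hn1 : (1 : Int) + ((board.length - 1 : Nat) : Int) = n := by rw [hn]; omega
  have hA0 : (if c0 = 0 then (1 : Int) else 0) = expVal a 0 1 := by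
    unfold expVal
    rw [PySem.Int.mod_eq_emod_of_pos (by omega)]
    rw [hadef']; split_ifs <;> omega
  have htail := inner_agree board a ha (board.length - 1) 0 1 (Or.inr le_rfl)
  rw [hn1] at htail
  rcases htail with ⟨hA, hB⟩ | ⟨hA, hB⟩
  · have hout := outer_agree board a ha n hn (board.length - 1) 1 le_rfl
    rw [hn1] at hout
    rw [hsplit]
    simp only [solveOuterA, cellOuter, hsplit, solveInnerA, cellInner, hc0.symm]
    simp only [ne_eq, not_true_eq_false, if_false, hA0, hA, hB,
      step_expVal a 0 n ha]
    simpa using hout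
  · rw [hsplit]
    simp only [solveOuterA, cellOuter, hsplit, solveInnerA, cellInner, hc0.symm]
    simp only [ne_eq, not_true_eq_false, if_false, hA0, hA, hB]
    simp

-- ---- part 2: characterisation of cellCheck ----

theorem cellInner_true_iff (board : List (List Int)) (a i : Int) (js : List Int) :
    cellInner board a i js = true
      ↔ ∀ j ∈ js, (i = 0 ∧ j = 0) ∨ pyCell board i j = expVal a i j := by
  induction js with
  | nil => simp [cellInner]
  | cons j js ih =>
    rw [show cellInner board a i (j :: js)
        = (if i = 0 ∧ j = 0 then cellInner board a i js
           else if pyCell board i j ≠ expVal a i j then false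
           else cellInner board a i js) from rfl,
      List.forall_mem_cons]
    split_ifs with h0 hc
    · rw [ih]
      exact ⟨fun h => ⟨Or.inl h0, h⟩, fun h => h.2⟩
    · constructor
      · intro h; simp at h
      · rintro ⟨(h00 | hm), -⟩
        · exact absurd h00 h0
        · exact absurd hm hc
    · rw [ih]
      rw [not_not] at hc
      exact ⟨fun h => ⟨Or.inr hc, h⟩, fun h => h.2⟩

theorem cellOuter_true_iff (board : List (List Int)) (a n : Int) (is : List Int) :
    cellOuter board a n is = true
      ↔ ∀ i ∈ is, cellInner board a i (PySem.List.pyRange 0 n 1) = true := by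
  induction is with
  | nil => simp [cellOuter]
  | cons i is ih =>
    by_cases h : cellInner board a i (PySem.List.pyRange 0 n 1) = true
    · simp [cellOuter, h, ih]
    · simp [cellOuter, h]

theorem cellCheck_true_iff (board : List (List Int)) :
    cellCheck board = true ↔ CellsOK board := by
  unfold cellCheck CellsOK
  rw [cellOuter_true_iff]
  constructor
  · intro h i j hi0 hin hj0 hjn hne
    have hmi : i ∈ PySem.List.pyRange 0 (board.length : Int) 1 :=
      (PySem.List.mem_pyRange_one).2 ⟨hi0, hin⟩
    have hmj : j ∈ PySem.List.pyRange 0 (board.length : Int) 1 :=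
      (PySem.List.mem_pyRange_one).2 ⟨hj0, hjn⟩
    rcases ((cellInner_true_iff board _ i _).1 (h i hmi) j hmj) with h00 | hok
    · exact absurd h00 hne
    · exact hok
  · intro h i hmi
    rw [cellInner_true_iff]
    intro j hmj
    rcases (PySem.List.mem_pyRange_one).1 hmi with ⟨hi0, hin⟩
    rcases (PySem.List.mem_pyRange_one).1 hmj with ⟨hj0, hjn⟩
    by_cases h00 : i = 0 ∧ j = 0
    · exact Or.inl h00
    · exact Or.inr (h i j hi0 hin hj0 hjn h00)

-- ---- part 3: characterisation of solve_alt ----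

theorem rowsLoop_true_iff (board : List (List Int)) (a n : Int) (is : List Int) :
    rowsLoop board a n is = true
      ↔ ∀ i ∈ is, PySem.List.slice (bRow board i) none (some n)
          = (if PySem.Int.mod i 2 = 0 then rowEven a n else rowOdd a n) := by
  induction is with
  | nil => simp [rowsLoop]
  | cons i is ih =>
    rw [show rowsLoop board a n (i :: is)
        = (if PySem.List.slice (bRow board i) none (some n)
             ≠ (if PySem.Int.mod i 2 = 0 then rowEven a n else rowOdd a n) then false
           else rowsLoop board a n is) from rfl,
      List.forall_mem_cons]
    by_cases h : PySem.List.slice (bRow board i) none (some n)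
        = (if PySem.Int.mod i 2 = 0 then rowEven a n else rowOdd a n)
    · rw [if_neg (not_not_intro h), ih]
      exact ⟨fun hrest => ⟨h, hrest⟩, fun hh => hh.2⟩
    · rw [if_pos h]
      constructor
      · intro hfalse; simp at hfalse
      · rintro ⟨heq, -⟩; exact absurd heq h

theorem solve_alt_true_iff (board : List (List Int)) :
    solve_alt board = true
      ↔ (PySem.List.slice (bRow board 0) (some 1) (some (board.length : Int))
            = PySem.List.slice (rowEven (aOf board) (board.length : Int)) (some 1) none
        ∧ ∀ i ∈ PySem.List.pyRange 1 (board.length : Int) 1,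
            PySem.List.slice (bRow board i) none (some (board.length : Int))
              = (if PySem.Int.mod i 2 = 0 then rowEven (aOf board) (board.length : Int)
                 else rowOdd (aOf board) (board.length : Int))) := by
  have haof : (if (PySem.List.pyGet? (bRow board 0) 0).getD 0 = 0 then (1:Int) else 0) = aOf board := rfl
  unfold solve_alt
  rw [haof]
  by_cases h : PySem.List.slice (bRow board 0) (some 1) (some (board.length : Int))
      = PySem.List.slice (rowEven (aOf board) (board.length : Int)) (some 1) none
  · simp [h, rowsLoop_true_iff]
  · simp [h]

-- ---- part 4: the templates are the expected-value map ----

theorem tmpl_eq_map (a n i : Int) :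
    (if PySem.Int.mod i 2 = 0 then rowEven a n else rowOdd a n)
      = (PySem.List.pyRange 0 n 1).map (fun j => expVal a i j) := by
  by_cases hp : PySem.Int.mod i 2 = 0
  · rw [if_pos hp]
    unfold rowEven
    apply List.map_congr_left
    intro j hj
    rcases (PySem.List.mem_pyRange_one).1 hj with ⟨hj0, _⟩
    unfold expVal
    simp only [PySem.Int.mod_eq_emod_of_pos (show (0:Int) < 2 by omega)] at hp ⊢
    split_ifs <;> omega
  · rw [if_neg hp]
    unfold rowOdd
    apply List.map_congr_left
    intro j hj
    rcases (PySem.List.mem_pyRange_one).1 hj with ⟨hj0, _⟩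
    unfold expVal
    simp only [PySem.Int.mod_eq_emod_of_pos (show (0:Int) < 2 by omega)] at hp ⊢
    split_ifs <;> omega

theorem pyCell_eq_getD (board : List (List Int)) (i : Int) (k : Nat) :
    pyCell board i (k : Int) = (bRow board i).getD k 0 := by
  unfold pyCell bRow
  rw [PySem.List.pyGet?_natCast]
  simp [List.getD]

theorem bRow_getD (board : List (List Int)) (i : Int) (hi : 0 ≤ i) :
    bRow board i = board.getD i.toNat [] := by
  unfold bRow
  rw [PySem.List.pyGet?_of_nonneg (xs := board) hi]
  simp [List.getD]

theorem getD_drop' (l : List Int) (n k : Nat) :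
    (l.drop n).getD k 0 = l.getD (n + k) 0 := by
  simp [List.getD, List.getElem?_drop]

-- take L row = map over range ↔ length and cell-wise (getD) conditions
theorem take_eq_map_iff (row : List Int) (L : Nat) (f : Int → Int) :
    row.take L = (PySem.List.pyRange 0 (L : Int) 1).map f
      ↔ (L ≤ row.length ∧ ∀ k : Nat, k < L → row.getD k 0 = f k) := by
  constructor
  · intro h
    have hlen := congrArg List.length h
    rw [List.length_take, List.length_map, PySem.List.length_pyRange_one] at hlen
    simp only [Int.sub_zero, Int.toNat_natCast] at hlen
    refine ⟨by omega, fun k hk => ?_⟩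
    have hk2 : k < row.length := by omega
    have hk3 : k < (row.take L).length := by rw [List.length_take]; omega
    have he := List.getElem_of_eq h hk3
    rw [List.getElem_take, List.getElem_map, PySem.List.getElem_pyRange_one] at he
    rw [List.getD_eq_getElem row 0 hk2, he, zero_add]
  · rintro ⟨hL, hcell⟩
    apply List.ext_getElem
    · rw [List.length_take, List.length_map, PySem.List.length_pyRange_one]
      simp only [Int.sub_zero, Int.toNat_natCast]
      omega
    · intro k h1 h2
      have hk : k < L := by rw [List.length_take] at h1; omega
      rw [List.getElem_take, List.getElem_map, PySem.List.getElem_pyRange_one]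
      have hc := hcell k hk
      rw [List.getD_eq_getElem row 0 (by omega)] at hc
      rw [zero_add, ← hc]

-- a row i ≥ 1 passes B's slice comparison iff it is long enough and cell-wise expected
theorem rowSlice_iff (board : List (List Int)) (a i : Int) :
    PySem.List.slice (bRow board i) none (some (board.length : Int))
        = (if PySem.Int.mod i 2 = 0 then rowEven a (board.length : Int)
           else rowOdd a (board.length : Int))
      ↔ (board.length ≤ (bRow board i).length ∧
          ∀ k : Nat, k < board.length → (bRow board i).getD k 0 = expVal a i k) := by
  rw [PySem.List.slice_to (bRow board i) (Int.natCast_nonneg board.length),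
    Int.toNat_natCast, tmpl_eq_map a _ i, take_eq_map_iff]

-- row 0 from index 1: B's comparison iff length and cell-wise conditions on the tail
theorem row0Slice_iff (board : List (List Int)) (a : Int) (hlen : 1 ≤ board.length) :
    PySem.List.slice (bRow board 0) (some 1) (some (board.length : Int))
        = PySem.List.slice (rowEven a (board.length : Int)) (some 1) none
      ↔ (board.length - 1 ≤ (bRow board 0).length - 1 ∧
          ∀ k : Nat, k < board.length - 1 →
            (bRow board 0).getD (1 + k) 0 = expVal a 0 (1 + (k : Int))) := by
  have h1 : PySem.List.slice (bRow board 0) (some 1) (some (board.length : Int))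
      = ((bRow board 0).drop 1).take (board.length - 1) := by
    rw [PySem.List.slice_toNat (bRow board 0) (by omega) (Int.natCast_nonneg board.length)]
    norm_num
  have heven : rowEven a (board.length : Int)
      = (PySem.List.pyRange 0 (board.length : Int) 1).map (fun j => expVal a 0 j) := by
    have := tmpl_eq_map a (board.length : Int) 0
    rwa [if_pos (by decide)] at this
  have h2 : PySem.List.slice (rowEven a (board.length : Int)) (some 1) none
      = ((PySem.List.pyRange 0 ((board.length - 1 : Nat) : Int) 1).map
          (fun j => expVal a 0 (1 + j))) := by
    rw [PySem.List.slice_from (rowEven a (board.length : Int)) (by omega), heven]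
    have hsplit : PySem.List.pyRange 0 (board.length : Int) 1
        = 0 :: PySem.List.pyRange 1 (board.length : Int) 1 :=
      PySem.List.pyRange_one_cons (by exact_mod_cast hlen)
    rw [hsplit]
    simp only [List.map_cons, Int.toNat_one, List.drop_succ_cons, List.drop_zero]
    rw [PySem.List.pyRange_one 1 (board.length : Int),
      PySem.List.pyRange_one 0 ((board.length - 1 : Nat) : Int), List.map_map, List.map_map]
    have harg : ((board.length : Int) - 1).toNat = (((board.length - 1 : Nat) : Int) - 0).toNat := by
      omega
    rw [harg]
    apply List.map_congr_left
    intro k _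
    simp [Function.comp]
  rw [h1, h2, take_eq_map_iff]
  constructor
  · rintro ⟨hL, hcell⟩
    refine ⟨by simpa using hL, fun k hk => ?_⟩
    have := hcell k hk
    rwa [getD_drop'] at this
  · rintro ⟨hL, hcell⟩
    refine ⟨by simpa using hL, fun k hk => ?_⟩
    rw [getD_drop']
    exact hcell k hk

-- link to Pre_'s preExp formulation
theorem expVal_eq_preExp (board : List (List Int)) (i j : Nat) :
    expVal (aOf board) i j = preExp ((board.getD 0 []).getD 0 0) i j := by
  have hc0 : pyCell board 0 0 = (board.getD 0 []).getD 0 0 := by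
    have := pyCell_eq_getD board 0 0
    simp only [Nat.cast_zero] at this
    rw [this, bRow_getD board 0 le_rfl]
    rfl
  unfold expVal preExp aOf
  rw [hc0, PySem.Int.mod_eq_emod_of_pos (show (0:Int) < 2 by omega)]
  have hmod : ((i : Int) + (j : Int)) % 2 = (((i + j) % 2 : Nat) : Int) := by
    push_cast
    omega
  rw [hmod]
  by_cases hp : (i + j) % 2 = 1
  · rw [if_pos hp, if_pos (by exact_mod_cast hp)]
  · rw [if_neg hp, if_neg (by exact_mod_cast hp)]

theorem mismatch_not_cellsOK (board : List (List Int))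
    (h : ∃ i < board.length, ∃ j < board.length,
      ¬(i = 0 ∧ j = 0) ∧ j < (board.getD i []).length ∧
      i * board.length + j < preOverflowKey board ∧
      (board.getD i []).getD j 0 ≠ preExp ((board.getD 0 []).getD 0 0) i j) :
    ¬ CellsOK board := by
  rintro hC
  obtain ⟨i, hi, j, hj, hne, hjlen, -, hmis⟩ := h
  apply hmis
  have hcell := hC (i : Int) (j : Int) (by exact_mod_cast Nat.zero_le i)
    (by exact_mod_cast hi) (by exact_mod_cast Nat.zero_le j) (by exact_mod_cast hj)
    (by
      intro hp
      exact hne ⟨by exact_mod_cast hp.1, by exact_mod_cast hp.2⟩)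
  rw [pyCell_eq_getD, bRow_getD board i (by exact_mod_cast Nat.zero_le i),
    Int.toNat_natCast] at hcell
  rw [hcell, expVal_eq_preExp]

-- solve_alt = true implies every cell is expected
theorem alt_imp_cellsOK (board : List (List Int)) (hlen : 1 ≤ board.length)
    (h : solve_alt board = true) : CellsOK board := by
  obtain ⟨h0, hrows⟩ := (solve_alt_true_iff board).1 h
  intro i j hi0 hin hj0 hjn hne
  by_cases hi1 : 1 ≤ i
  · have hmem : i ∈ PySem.List.pyRange 1 (board.length : Int) 1 :=
      (PySem.List.mem_pyRange_one).2 ⟨hi1, hin⟩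
    obtain ⟨-, hcell⟩ := (rowSlice_iff board (aOf board) i).1 (hrows i hmem)
    have hk := hcell j.toNat (by omega)
    have hji : ((j.toNat : Nat) : Int) = j := by omega
    calc pyCell board i j = pyCell board i ((j.toNat : Nat) : Int) := by rw [hji]
      _ = (bRow board i).getD j.toNat 0 := pyCell_eq_getD board i j.toNat
      _ = expVal (aOf board) i ((j.toNat : Nat) : Int) := hk
      _ = expVal (aOf board) i j := by rw [hji]
  · have hi00 : i = 0 := by omega
    subst hi00
    have hj1 : 1 ≤ j := by
      rcases (lt_or_ge 0 j) with h' | h'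
      · omega
      · exact absurd ⟨rfl, by omega⟩ hne
    obtain ⟨-, hcell⟩ := (row0Slice_iff board (aOf board) hlen).1 h0
    have hk := hcell (j.toNat - 1) (by omega)
    have hji : (1 : Int) + ((j.toNat - 1 : Nat) : Int) = j := by omega
    rw [hji] at hk
    have h' : ((1 + (j.toNat - 1) : Nat) : Int) = j := by omega
    calc pyCell board 0 j = pyCell board 0 ((1 + (j.toNat - 1) : Nat) : Int) := by rw [h']
      _ = (bRow board 0).getD (1 + (j.toNat - 1)) 0 := pyCell_eq_getD board 0 _
      _ = expVal (aOf board) 0 j := hk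

-- under CellsOK and every row long enough, solve_alt = true
theorem cells_imp_alt (board : List (List Int)) (hlen : 1 ≤ board.length)
    (hlong : ∀ row ∈ board, board.length ≤ row.length)
    (hC : CellsOK board) : solve_alt board = true := by
  have hbr : ∀ i : Int, 0 ≤ i → i < (board.length : Int) →
      board.length ≤ (bRow board i).length := by
    intro i h0 hn
    rw [bRow_getD board i h0]
    have hmem : board.getD i.toNat [] ∈ board := by
      rw [List.getD_eq_getElem board [] (by omega)]
      exact List.getElem_mem _
    exact hlong _ hmem
  refine (solve_alt_true_iff board).2 ⟨?_, ?_⟩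
  · rw [row0Slice_iff board (aOf board) hlen]
    refine ⟨by have := hbr 0 le_rfl (by exact_mod_cast hlen); omega, fun k hk => ?_⟩
    have h' : ((1 + k : Nat) : Int) = 1 + (k : Int) := by omega
    have hca := hC 0 ((1 + k : Nat) : Int) le_rfl (by exact_mod_cast hlen)
      (by omega) (by omega) (by intro hp; omega)
    rw [pyCell_eq_getD] at hca
    rw [hca]
    exact congrArg (expVal (aOf board) 0) h'
  · intro i hmem
    rcases (PySem.List.mem_pyRange_one).1 hmem with ⟨hi1, hin⟩
    rw [rowSlice_iff board (aOf board) i]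
    refine ⟨hbr i (by omega) hin, fun k hk => ?_⟩
    have hca := hC i (k : Int) (by omega) hin (by exact_mod_cast Nat.zero_le k)
      (by exact_mod_cast hk) (by intro hp; omega)
    rw [pyCell_eq_getD] at hca
    exact hca

-- ===== VERDICT (by name: the statement is the Claim_ definition above) =====
theorem solve_spec : Claim_equal_solve := by
  intro board _ hpre
  obtain ⟨hne, hbr⟩ := hpre
  have hlen : 1 ≤ board.length := List.length_pos_of_ne_nil hne
  unfold Spec_solve
  rw [solve_eq_cellCheck board hlen]
  by_cases hC : CellsOK board
  · have h1 : cellCheck board = true := (cellCheck_true_iff board).2 hC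
    have hlong : ∀ row ∈ board, board.length ≤ row.length := by
      rcases hbr with h | h
      · exact h
      · exact absurd hC (mismatch_not_cellsOK board h)
    rw [h1, cells_imp_alt board hlen hlong hC]
  · have h1 : cellCheck board = false := by
      cases hcc : cellCheck board
      · rfl
      · exact absurd ((cellCheck_true_iff board).1 hcc) hC
    have h2 : solve_alt board = false := by
      cases hsa : solve_alt board
      · rfl
      · exact absurd (alt_imp_cellsOK board hlen hsa) hC
    rw [h1, h2]
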